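-- pv_equiv track=rewrite | github.com/OPU-Surveillance-System/monitoring | master/scripts/planner/solvers/AlgoPlusCourtsCheminsPourDrones.py | distribution1
-- ===== SOURCE A (Python) =====
-- import copy
--
-- def length(ListOfList):
--     #l = 0
--     #for List in ListOfList:
--         #l = l + len(List)
--     l = [len(List) for List in ListOfList]
--     return sum(l)
--
-- def distribution1(Routes):
--     R = copy.deepcopy(Routes)
--     d1 = []
--     d2 = []
--     while len(R) > 0:
--         L = list(map(len, R))
--         i = L.index(max(L))
--         if length(d1) <= length(d2):
--             d1.append(R[i])
--         else:
--             d2.append(R[i])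
--         del R[i]
--     return d1,d2
-- ===== SOURCE B (Python) =====
-- def distribution1(Routes):
--     d1, d2 = [], []
--     s1 = s2 = 0
--     for r in sorted(Routes, key=len, reverse=True):
--         if s1 <= s2:
--             d1.append(r)
--             s1 += len(r)
--         else:
--             d2.append(r)
--             s2 += len(r)
--     return d1, d2
-- ===== Notes on version B (the rewrite author's own statement) =====
-- stated objective: faster
-- what changed: Replaced the quadratic select-max/delete loop (which also recomputes both bin lengths from scratch every iteration) by one stable descending sort by length followed by a single pass with two running bin-total counters.
import Mathlib
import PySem

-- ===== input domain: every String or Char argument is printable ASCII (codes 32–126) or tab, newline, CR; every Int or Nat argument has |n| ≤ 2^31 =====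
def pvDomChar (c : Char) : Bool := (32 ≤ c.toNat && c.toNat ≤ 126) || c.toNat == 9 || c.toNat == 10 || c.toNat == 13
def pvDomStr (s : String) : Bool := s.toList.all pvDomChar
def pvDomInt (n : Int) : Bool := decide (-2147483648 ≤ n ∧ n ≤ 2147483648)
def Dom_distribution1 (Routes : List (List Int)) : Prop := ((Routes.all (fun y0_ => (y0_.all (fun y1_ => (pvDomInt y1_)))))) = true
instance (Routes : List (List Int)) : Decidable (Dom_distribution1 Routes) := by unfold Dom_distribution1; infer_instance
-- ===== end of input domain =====

-- B replaces A's quadratic select-max/delete loop by one stable descending sort by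
-- length plus a single pass with running bin-total counters.

-- ===== PORT A =====

-- length(ListOfList) = sum([len(List) for List in ListOfList])
def lengthA (xss : List (List Int)) : Int :=
  (xss.map (fun l => (l.length : Int))).sum

-- pvMmax/pvFmi characterise max(L) and L.index(max(L)) of a nonempty Int list; they and
-- the lemmas up to pvFmi_lt_length exist only to justify termination of loopA below
def pvMmax : List Int → Int
  | [] => 0
  | [a] => a
  | a :: b :: l => max a (pvMmax (b :: l))

def pvFmi : List Int → Nat
  | [] => 0
  | [_] => 0
  | a :: b :: l => if a < pvMmax (b :: l) then pvFmi (b :: l) + 1 else 0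

theorem pvMmax_foldl (a : Int) (l : List Int) : pvMmax (a :: l) = List.foldl max a l := by
  induction l generalizing a with
  | nil => rfl
  | cons b l ih =>
    have h1 : pvMmax (a :: b :: l) = max a (pvMmax (b :: l)) := rfl
    rw [h1, ih, List.foldl_cons, List.foldl_assoc]

theorem pvMaxq (L : List Int) (hL : L ≠ []) :
    PySem.List.max? L (fun v => v) = some (pvMmax L) := by
  cases L with
  | nil => simp at hL
  | cons a l => rw [PySem.List.max?_id_cons, pvMmax_foldl]

theorem pvIdxOf_fmi (L : List Int) (hL : L ≠ []) :
    List.idxOf? (pvMmax L) L = some (pvFmi L) := by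
  induction L with
  | nil => simp at hL
  | cons a l ih =>
    cases l with
    | nil => simp [pvMmax, pvFmi, List.idxOf?_cons]
    | cons b t =>
      by_cases h : a < pvMmax (b :: t)
      · have hmx : pvMmax (a :: b :: t) = pvMmax (b :: t) := by
          simp only [pvMmax]; omega
        have hne : (a == pvMmax (b :: t)) = false := by
          simp only [beq_eq_false_iff_ne, ne_eq]; omega
        rw [hmx, List.idxOf?_cons, if_neg (by simp [hne]), ih (by simp)]
        simp [pvFmi, h]
      · have hmx : pvMmax (a :: b :: t) = a := by
          simp only [pvMmax]; omega
        simp [List.idxOf?_cons, pvFmi, h, hmx]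

theorem pvIdx_eq_fmi (L : List Int) (hL : L ≠ []) :
    ((PySem.List.index? L ((PySem.List.max? L (fun v => v)).getD 0)).getD 0) = pvFmi L := by
  rw [pvMaxq L hL]
  simp [PySem.List.index?, pvIdxOf_fmi L hL]

theorem pvFmi_lt_length (L : List Int) (hL : L ≠ []) : pvFmi L < L.length := by
  induction L with
  | nil => simp at hL
  | cons a l ih =>
    cases l with
    | nil => simp [pvFmi]
    | cons b t =>
      by_cases h : a < pvMmax (b :: t)
      · have := ih (by simp)
        simp only [pvFmi, if_pos h, List.length_cons] at this ⊢
        omega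
      · simp [pvFmi, h]

-- while len(R) > 0: L = list(map(len, R)); i = L.index(max(L)); append R[i] to the
-- shorter of d1,d2 (d1 on ties, comparing length(d1) <= length(d2)); del R[i]
def loopA (R d1 d2 : List (List Int)) : List (List Int) × List (List Int) :=
  match hR : R with
  | [] => (d1, d2)
  | _ :: _ =>
    let L := R.map (fun r => (r.length : Int))
    let m := (PySem.List.max? L (fun v => v)).getD 0
    let i := (PySem.List.index? L m).getD 0
    if lengthA d1 ≤ lengthA d2 then
      loopA (R.eraseIdx i) (d1 ++ [R.getD i []]) d2
    else
      loopA (R.eraseIdx i) d1 (d2 ++ [R.getD i []])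
termination_by R.length
decreasing_by
  all_goals
    have hmapne : R.map (fun r => (r.length : Int)) ≠ [] := by simp [hR]
    have h1 := pvIdx_eq_fmi (R.map (fun r => (r.length : Int))) hmapne
    have h2 := pvFmi_lt_length (R.map (fun r => (r.length : Int))) hmapne
    have hi : i < R.length := by
      simp only [i, m, L, List.map_subtype, List.unattach_attach]
      rw [h1]; simpa using h2
    rw [List.length_eraseIdx_of_lt hi, ← hR]
    have hRlen : 0 < R.length := by simp [hR]
    omega

def distribution1 (Routes : List (List Int)) : List (List Int) × List (List Int) :=
  loopA Routes [] []

-- ===== PORT B =====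
def distribution1_alt (Routes : List (List Int)) : List (List Int) × List (List Int) :=
  let ordered := PySem.List.sorted Routes (fun r => (r.length : Int)) true
  let st := ordered.foldl
    (fun st r =>
      if st.2.1 ≤ st.2.2 then ((st.1.1 ++ [r], st.1.2), (st.2.1 + (r.length : Int), st.2.2))
      else ((st.1.1, st.1.2 ++ [r]), (st.2.1, st.2.2 + (r.length : Int))))
    (([], []), (0, 0))
  st.1

-- ===== PRECONDITION & SPEC =====
def Spec_distribution1 (Routes : List (List Int)) (out : List (List Int) × List (List Int)) : Prop := out = distribution1_alt Routes
instance (Routes : List (List Int)) (out : List (List Int) × List (List Int)) : Decidable (Spec_distribution1 Routes out) := by unfold Spec_distribution1; infer_instance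

-- ===== CLAIM (what is proved, stated in full; the proofs are below) =====
def Claim_equal_distribution1 : Prop := ∀ (Routes : List (List Int)), Dom_distribution1 Routes → Spec_distribution1 Routes (distribution1 Routes)

-- ===== LEMMAS AND PROOFS =====

theorem pvMmax_le (L : List Int) : ∀ y ∈ L, y ≤ pvMmax L := by
  induction L with
  | nil => simp
  | cons a l ih =>
    intro y hy
    cases l with
    | nil => simp at hy; simp [pvMmax, hy]
    | cons b t =>
      rcases List.mem_cons.1 hy with h | h
      · simp [pvMmax, h]
      · exact le_trans (ih y h) (by simp [pvMmax])

theorem pvMmax_append (t : List Int) (x : Int) (ht : t ≠ []) :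
    pvMmax (t ++ [x]) = max (pvMmax t) x := by
  induction t with
  | nil => simp at ht
  | cons a l ih =>
    cases l with
    | nil => simp [pvMmax]
    | cons b u =>
      have := ih (by simp)
      simp only [List.cons_append] at this ⊢
      simp [pvMmax, this, max_assoc]

theorem pvFmi_append (t : List Int) (x : Int) (ht : t ≠ []) :
    pvFmi (t ++ [x]) = if pvMmax t < x then t.length else pvFmi t := by
  induction t with
  | nil => simp at ht
  | cons a l ih =>
    cases l with
    | nil =>
      show (if a < pvMmax [x] then pvFmi [x] + 1 else 0) = _
      simp [pvMmax, pvFmi]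
    | cons b u =>
      have ihs := ih (by simp)
      have hmx := pvMmax_append (b :: u) x (by simp)
      simp only [List.cons_append] at ihs hmx ⊢
      simp only [pvFmi, pvMmax, ihs, hmx, List.length_cons]
      split_ifs <;> omega

theorem pvMmax_attained (L : List Int) (hL : L ≠ []) :
    L.getD (pvFmi L) 0 = pvMmax L := by
  induction L with
  | nil => simp at hL
  | cons a l ih =>
    cases l with
    | nil => simp [pvFmi, pvMmax]
    | cons b t =>
      by_cases h : a < pvMmax (b :: t)
      · have hmx : pvMmax (a :: b :: t) = pvMmax (b :: t) := by
          simp only [pvMmax]; omega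
        have iht := ih (by simp)
        simp only [pvFmi, if_pos h, hmx, List.getD_cons_succ]
        exact iht
      · have hmx : pvMmax (a :: b :: t) = a := by
          simp only [pvMmax]; omega
        simp [pvFmi, h, hmx]

theorem pv_sorted_selection (key : List Int → Int) (R : List (List Int)) (hR : R ≠ []) :
    PySem.List.sorted R key true =
      R.getD (pvFmi (R.map key)) [] ::
        PySem.List.sorted (R.eraseIdx (pvFmi (R.map key))) key true := by
  induction R using List.reverseRecOn with
  | nil => simp at hR
  | append_singleton t x ih =>
    cases ht : t with
    | nil => subst ht; rfl
    | cons a u =>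
      rw [← ht]
      have htne : t ≠ [] := by simp [ht]
      have hmapne : t.map key ≠ [] := by simp [ht]
      have hfmiapp : pvFmi ((t ++ [x]).map key)
          = if pvMmax (t.map key) < key x then t.length else pvFmi (t.map key) := by
        rw [List.map_append]; simpa using pvFmi_append (t.map key) (key x) hmapne
      have hfl : pvFmi (t.map key) < t.length := by
        simpa using pvFmi_lt_length (t.map key) hmapne
      have hsortapp : PySem.List.sorted (t ++ [x]) key true
          = PySem.List.insertBy (fun a b => decide (key b < key a)) x (PySem.List.sorted t key true) := by
        rw [PySem.List.sorted_rev_eq_foldl_insertBy, PySem.List.sorted_rev_eq_foldl_insertBy,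
          List.foldl_append]
        rfl
      have ihs := ih htne
      by_cases hcase : pvMmax (t.map key) < key x
      · -- x is the strict new maximum: it is selected first
        rcases hsrt : PySem.List.sorted t key true with _ | ⟨m, s⟩
        · exact absurd ((PySem.List.sorted_eq_nil_iff t key true).1 hsrt) htne
        · have hmmem : m ∈ t := by
            have := (PySem.List.sorted_perm t key true).mem_iff (a := m)
            rw [hsrt] at this; exact this.1 (by simp)
          have hmle : key m ≤ pvMmax (t.map key) :=
            pvMmax_le (t.map key) (key m) (List.mem_map_of_mem hmmem)
          have hbm : (decide (key m < key x)) = true := by simp; omega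
          have hins : PySem.List.insertBy (fun a b => decide (key b < key a)) x (m :: s)
              = x :: m :: s := by
            show (if decide (key m < key x) = true then x :: m :: s
                  else m :: PySem.List.insertBy (fun a b => decide (key b < key a)) x s) = x :: m :: s
            rw [hbm]
            rfl
          rw [hsortapp, hsrt, hins, hfmiapp, if_pos hcase,
            List.eraseIdx_append_of_length_le (le_refl t.length)]
          simp [← hsrt]
      · -- the first maximum of t stays the first maximum of t ++ [x]
        rw [hsortapp, ihs]
        have hkey : key (t.getD (pvFmi (t.map key)) []) = pvMmax (t.map key) := by
          have hatt := pvMmax_attained (t.map key) hmapne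
          rw [List.getD_eq_getElem _ _ (by simpa using hfl)] at hatt
          rw [List.getD_eq_getElem _ _ hfl]
          simpa using hatt
        have hbm : (decide (key (t.getD (pvFmi (t.map key)) []) < key x)) = false := by
          rw [hkey]; simp; omega
        have hstep : PySem.List.insertBy (fun a b => decide (key b < key a)) x
              (t.getD (pvFmi (t.map key)) [] :: PySem.List.sorted (t.eraseIdx (pvFmi (t.map key))) key true)
            = t.getD (pvFmi (t.map key)) [] ::
              PySem.List.insertBy (fun a b => decide (key b < key a)) x
                (PySem.List.sorted (t.eraseIdx (pvFmi (t.map key))) key true) := by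
          show (if decide (key (t.getD (pvFmi (t.map key)) []) < key x) = true then
                  x :: t.getD (pvFmi (t.map key)) [] ::
                    PySem.List.sorted (t.eraseIdx (pvFmi (t.map key))) key true
                else t.getD (pvFmi (t.map key)) [] ::
                  PySem.List.insertBy (fun a b => decide (key b < key a)) x
                    (PySem.List.sorted (t.eraseIdx (pvFmi (t.map key))) key true)) = _
          rw [hbm]
          rfl
        rw [hstep, hfmiapp, if_neg hcase]
        have htail : PySem.List.insertBy (fun a b => decide (key b < key a)) x
              (PySem.List.sorted (t.eraseIdx (pvFmi (t.map key))) key true)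
            = PySem.List.sorted ((t ++ [x]).eraseIdx (pvFmi (t.map key))) key true := by
          rw [List.eraseIdx_append_of_lt_length hfl,
            PySem.List.sorted_rev_eq_foldl_insertBy (t.eraseIdx (pvFmi (t.map key)) ++ [x]),
            List.foldl_append, ← PySem.List.sorted_rev_eq_foldl_insertBy]
          rfl
        rw [htail]
        congr 1
        rw [List.getD_append _ _ _ _ hfl]

theorem pv_loopA_nil (d1 d2 : List (List Int)) : loopA [] d1 d2 = (d1, d2) := by
  rw [loopA]

theorem pv_loopA_cons (R d1 d2 : List (List Int)) (hne : R ≠ []) :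
    loopA R d1 d2 =
      if lengthA d1 ≤ lengthA d2 then
        loopA (R.eraseIdx (pvFmi (R.map (fun r => (r.length : Int)))))
          (d1 ++ [R.getD (pvFmi (R.map (fun r => (r.length : Int)))) []]) d2
      else
        loopA (R.eraseIdx (pvFmi (R.map (fun r => (r.length : Int))))) d1
          (d2 ++ [R.getD (pvFmi (R.map (fun r => (r.length : Int)))) []]) := by
  cases R with
  | nil => exact absurd rfl hne
  | cons hd tl =>
    rw [loopA]
    have hmapne : (hd :: tl).map (fun r => (r.length : Int)) ≠ [] := by simp
    rw [pvIdx_eq_fmi _ hmapne]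

theorem pv_lengthA_append (d : List (List Int)) (x : List Int) :
    lengthA (d ++ [x]) = lengthA d + (x.length : Int) := by
  simp [lengthA]

theorem pv_loop_bridge (n : Nat) (R d1 d2 : List (List Int)) (s1 s2 : Int)
    (hn : R.length ≤ n) (h1 : s1 = lengthA d1) (h2 : s2 = lengthA d2) :
    loopA R d1 d2 =
      ((PySem.List.sorted R (fun r => (r.length : Int)) true).foldl
        (fun st r =>
          if st.2.1 ≤ st.2.2 then ((st.1.1 ++ [r], st.1.2), (st.2.1 + (r.length : Int), st.2.2))
          else ((st.1.1, st.1.2 ++ [r]), (st.2.1, st.2.2 + (r.length : Int))))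
        ((d1, d2), (s1, s2))).1 := by
  induction n generalizing R d1 d2 s1 s2 with
  | zero =>
    have hRnil : R = [] := List.eq_nil_of_length_eq_zero (Nat.le_zero.1 hn)
    subst hRnil
    rw [pv_loopA_nil, (PySem.List.sorted_eq_nil_iff [] _ true).2 rfl]
    rfl
  | succ n ih =>
    cases hRc : R with
    | nil =>
      rw [pv_loopA_nil, (PySem.List.sorted_eq_nil_iff [] _ true).2 rfl]
      rfl
    | cons hd tl =>
      rw [← hRc]
      have hne : R ≠ [] := by simp [hRc]
      have hmapne : R.map (fun r => (r.length : Int)) ≠ [] := by simp [hRc]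
      have hfl : pvFmi (R.map (fun r => (r.length : Int))) < R.length := by
        simpa using pvFmi_lt_length _ hmapne
      have hlen : (R.eraseIdx (pvFmi (R.map (fun r => (r.length : Int))))).length ≤ n := by
        rw [List.length_eraseIdx_of_lt hfl]
        have : 0 < R.length := by simp [hRc]
        omega
      rw [pv_loopA_cons R d1 d2 hne,
        pv_sorted_selection (fun r => (r.length : Int)) R hne, List.foldl_cons]
      by_cases hc : lengthA d1 ≤ lengthA d2
      · rw [if_pos hc, if_pos (by rw [h1, h2]; exact hc)]
        exact ih _ _ _ _ _ hlen (by rw [h1, pv_lengthA_append]) h2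
      · rw [if_neg hc, if_neg (by rw [h1, h2]; exact hc)]
        exact ih _ _ _ _ _ hlen h1 (by rw [h2, pv_lengthA_append])

-- ===== VERDICT (by name: the statement is the Claim_ definition above) =====
theorem distribution1_spec : Claim_equal_distribution1 := by
  intro Routes _
  unfold Spec_distribution1 distribution1 distribution1_alt
  exact pv_loop_bridge Routes.length Routes [] [] 0 0 le_rfl rfl rfl
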